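-- pv_equiv track=rewrite | github.com/Kim-Minhee/Baekjoon | 백준/Bronze/7015. Millennium/Millennium.py | get_total_days_before
-- ===== SOURCE A (Python) =====
-- def get_total_days_before(year, month, day):
--     """
--     1년 1월 1일부터 주어진 날짜(Y, M, D)가 시작되기 전까지의 총 일수를 계산합니다.
--     """
--     total_days = 0
--
--     # 1. 지난 해들의 총 일수 계산 (1년부터 year-1년까지)
--     for y in range(1, year):
--         # 3의 배수인 해는 특별한 해 (200일)
--         if y % 3 == 0:
--             total_days += 200
--         # 그 외에는 일반적인 해 (195일)
--         else:
--             total_days += 195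
--
--     # 2. 현재 해의 지난 달들의 총 일수 계산 (1월부터 month-1월까지)
--     is_current_year_special = (year % 3 == 0)
--     for m in range(1, month):
--         if is_current_year_special:
--             total_days += 20  # 특별한 해는 모든 달이 20일
--         else:
--             # 일반적인 해는 홀수 달이 20일, 짝수 달이 19일
--             if m % 2 == 1:  # 홀수 달 (큰 달)
--                 total_days += 20
--             else:  # 짝수 달 (작은 달)
--                 total_days += 19
--
--     # 3. 현재 달의 지난 일수 계산 (1일부터 day-1일까지)
--     total_days += (day - 1)
--
--     return total_days
-- ===== SOURCE B (Python) =====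
-- def get_total_days_before(year, month, day):
--     # Past years: 195 per year plus 5 extra for each multiple of 3 in 1..year-1.
--     n = max(year - 1, 0)
--     total = 195 * n + 5 * (n // 3)
--     # Past months of the current year.
--     m = max(month - 1, 0)
--     if year % 3 == 0:
--         total += 20 * m
--     else:
--         # odd months (20 days) in 1..m: (m+1)//2 of them; the rest are 19.
--         total += 19 * m + (m + 1) // 2
--     return total + day - 1
-- ===== Notes on version B (the rewrite author's own statement) =====
-- stated objective: faster
-- what changed: Replaced the per-year and per-month accumulation loops by a closed-form arithmetic formula counting multiples of 3 among past years and odd months directly.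
import Mathlib
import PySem

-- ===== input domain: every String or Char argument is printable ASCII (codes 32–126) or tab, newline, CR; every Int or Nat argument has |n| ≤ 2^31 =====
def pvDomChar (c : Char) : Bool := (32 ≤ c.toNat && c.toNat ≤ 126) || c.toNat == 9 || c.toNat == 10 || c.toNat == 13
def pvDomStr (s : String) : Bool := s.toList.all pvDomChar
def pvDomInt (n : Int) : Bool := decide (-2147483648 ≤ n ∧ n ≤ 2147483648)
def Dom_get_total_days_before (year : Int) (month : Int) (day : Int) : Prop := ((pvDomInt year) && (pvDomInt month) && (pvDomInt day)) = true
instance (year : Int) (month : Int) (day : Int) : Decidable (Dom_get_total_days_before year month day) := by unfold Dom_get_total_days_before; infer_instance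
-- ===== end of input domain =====

-- B replaces A's two accumulation loops by a closed-form formula (O(1) vs O(year+month)).
-- ===== PORT A =====
def get_total_days_before (year : Int) (month : Int) (day : Int) : Int :=
  let total1 : Int := (PySem.List.pyRange 1 year 1).foldl
    (fun acc y => if PySem.Int.mod y 3 = 0 then acc + 200 else acc + 195) 0
  let isSpecial : Bool := PySem.Int.mod year 3 = 0
  let total2 : Int := (PySem.List.pyRange 1 month 1).foldl
    (fun acc m =>
      if isSpecial then acc + 20
      else if PySem.Int.mod m 2 = 1 then acc + 20 else acc + 19) total1
  total2 + (day - 1)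

-- ===== PORT B =====
def get_total_days_before_alt (year : Int) (month : Int) (day : Int) : Int :=
  let n : Int := max (year - 1) 0
  let total : Int := 195 * n + 5 * PySem.Int.floordiv n 3
  let m : Int := max (month - 1) 0
  let months : Int :=
    if PySem.Int.mod year 3 = 0 then 20 * m
    else 19 * m + PySem.Int.floordiv (m + 1) 2
  total + months + day - 1

-- ===== PRECONDITION & SPEC =====
def Spec_get_total_days_before (year : Int) (month : Int) (day : Int) (out : Int) : Prop := out = get_total_days_before_alt year month day
instance (year : Int) (month : Int) (day : Int) (out : Int) : Decidable (Spec_get_total_days_before year month day out) := by unfold Spec_get_total_days_before; infer_instance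

-- ===== CLAIM (what is proved, stated in full; the proofs are below) =====
def Claim_equal_get_total_days_before : Prop := ∀ (year : Int) (month : Int) (day : Int), Dom_get_total_days_before year month day → Spec_get_total_days_before year month day (get_total_days_before year month day)

-- ===== LEMMAS AND PROOFS =====

-- Year loop over 1..k sums 195 per year plus 5 extra for each multiple of 3.
theorem yearLoop_closed (k : Nat) (acc : Int) :
    (PySem.List.pyRange 1 (1 + (k : Int)) 1).foldl
      (fun acc y => if PySem.Int.mod y 3 = 0 then acc + 200 else acc + 195) acc
    = acc + 195 * k + 5 * ((k / 3 : Nat) : Int) := by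
  induction k generalizing acc with
  | zero => simp
  | succ k ih =>
    rw [show (1 + ((k+1:Nat)):Int) = (1 + (k:Int)) + 1 by push_cast; ring,
        PySem.List.pyRange_one_succ_right (by omega), List.foldl_append, ih]
    simp only [List.foldl]
    have hm : PySem.Int.mod (1 + (k:Int)) 3 = (((k+1) % 3 : Nat) : Int) := by
      rw [show (1 + (k:Int)) = ((k+1 : Nat) : Int) by push_cast; ring]
      exact_mod_cast PySem.Int.mod_natCast (k+1) 3
    rw [hm]
    by_cases h3 : (k+1) % 3 = 0
    · rw [if_pos (by exact_mod_cast h3)]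
      have : (k+1)/3 = k/3 + 1 := by omega
      rw [this]; push_cast; ring
    · rw [if_neg (by exact_mod_cast h3)]
      have : (k+1)/3 = k/3 := by omega
      rw [this]; push_cast; ring

-- Month loop (non-special year) over 1..k: 19 per month plus 1 extra per odd month.
theorem monthLoop_closed (k : Nat) (acc : Int) :
    (PySem.List.pyRange 1 (1 + (k : Int)) 1).foldl
      (fun acc m => if PySem.Int.mod m 2 = 1 then acc + 20 else acc + 19) acc
    = acc + 19 * k + (((k + 1) / 2 : Nat) : Int) := by
  induction k generalizing acc with
  | zero => simp
  | succ k ih =>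
    rw [show (1 + ((k+1:Nat)):Int) = (1 + (k:Int)) + 1 by push_cast; ring,
        PySem.List.pyRange_one_succ_right (by omega), List.foldl_append, ih]
    simp only [List.foldl]
    have hm : PySem.Int.mod (1 + (k:Int)) 2 = (((k+1) % 2 : Nat) : Int) := by
      rw [show (1 + (k:Int)) = ((k+1 : Nat) : Int) by push_cast; ring]
      exact_mod_cast PySem.Int.mod_natCast (k+1) 2
    rw [hm]
    by_cases h2 : (k+1) % 2 = 1
    · rw [if_pos (by exact_mod_cast h2)]
      have : (k+2)/2 = (k+1)/2 + 1 := by omega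
      rw [show k+1+1 = k+2 from rfl, this]; push_cast; ring
    · rw [if_neg (by exact_mod_cast h2)]
      have : (k+2)/2 = (k+1)/2 := by omega
      rw [show k+1+1 = k+2 from rfl, this]; push_cast; ring

-- Month loop (special year) over 1..k: 20 per month.
theorem monthLoop_special (k : Nat) (acc : Int) :
    (PySem.List.pyRange 1 (1 + (k : Int)) 1).foldl (fun acc _ => acc + 20) acc
    = acc + 20 * k := by
  induction k generalizing acc with
  | zero => simp
  | succ k ih =>
    rw [show (1 + ((k+1:Nat)):Int) = (1 + (k:Int)) + 1 by push_cast; ring,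
        PySem.List.pyRange_one_succ_right (by omega), List.foldl_append, ih]
    simp only [List.foldl]; push_cast; ring

-- ===== VERDICT (by name: the statement is the Claim_ definition above) =====
theorem get_total_days_before_spec : Claim_equal_get_total_days_before := by
  intro year month day _
  unfold Spec_get_total_days_before get_total_days_before get_total_days_before_alt
  have hyears : (PySem.List.pyRange 1 year 1).foldl
      (fun acc y => if PySem.Int.mod y 3 = 0 then acc + 200 else acc + 195) 0
      = 195 * max (year - 1) 0 + 5 * PySem.Int.floordiv (max (year - 1) 0) 3 := by
    by_cases hy : year ≤ 1
    · rw [PySem.List.pyRange_one_eq_nil hy, show max (year - 1) 0 = 0 by omega]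
      norm_num [PySem.Int.floordiv]
    · have h1 : year = 1 + (((year - 1).toNat : Nat) : Int) := by omega
      have h2 : max (year - 1) 0 = (((year - 1).toNat : Nat) : Int) := by omega
      have h3 : PySem.Int.floordiv (((year - 1).toNat : Nat) : Int) 3
          = (((year - 1).toNat / 3 : Nat) : Int) := by
        exact_mod_cast PySem.Int.floordiv_natCast (year - 1).toNat 3
      rw [h1, yearLoop_closed,
          show max (1 + (((year - 1).toNat : Nat) : Int) - 1) 0 = (((year - 1).toNat : Nat) : Int) by omega,
          h3]; push_cast; ring
  rw [hyears]
  by_cases hs : PySem.Int.mod year 3 = 0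
  · simp only [hs, decide_true, if_pos]
    by_cases hm : month ≤ 1
    · rw [PySem.List.pyRange_one_eq_nil hm, show max (month - 1) 0 = 0 by omega]
      simp only [List.foldl]; ring
    · have h1 : month = 1 + (((month - 1).toNat : Nat) : Int) := by omega
      have h2 : max (month - 1) 0 = (((month - 1).toNat : Nat) : Int) := by omega
      rw [h1, monthLoop_special,
          show max (1 + (((month - 1).toNat : Nat) : Int) - 1) 0 = (((month - 1).toNat : Nat) : Int) by omega]
      ring
  · simp only [hs, decide_false, if_false, Bool.false_eq_true]
    by_cases hm : month ≤ 1
    · rw [PySem.List.pyRange_one_eq_nil hm, show max (month - 1) 0 = 0 by omega,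
          show PySem.Int.floordiv ((0:Int) + 1) 2 = 0 by decide]
      simp only [List.foldl]; ring
    · have h1 : month = 1 + (((month - 1).toNat : Nat) : Int) := by omega
      have h2 : max (month - 1) 0 = (((month - 1).toNat : Nat) : Int) := by omega
      have h3 : PySem.Int.floordiv ((((month - 1).toNat : Nat) : Int) + 1) 2
          = ((((month - 1).toNat + 1) / 2 : Nat) : Int) := by
        exact_mod_cast PySem.Int.floordiv_natCast ((month - 1).toNat + 1) 2
      rw [h1, monthLoop_closed,
          show max (1 + (((month - 1).toNat : Nat) : Int) - 1) 0 = (((month - 1).toNat : Nat) : Int) by omega,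
          h3]; push_cast; ring
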